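-- pv_equiv track=rewrite | github.com/david-cattermole/sql-learning | python/mediaDB2/utils.py | getMount
-- ===== SOURCE A (Python) =====
-- def getMount(mounts, path):
--     mount = None
--     mount_dir = None
--     keys = reversed(sorted(mounts.keys()))
--     for d in keys:
--         if path.startswith(d) is True:
--             mount = mounts[d]
--             mount_dir = d
--             break
--     return mount_dir, mount
-- ===== SOURCE B (Python) =====
-- def getMount(mounts, path):
--     top = min(len(path), max(map(len, mounts), default=-1))
--     for i in range(top, -1, -1):
--         p = path[:i]
--         if p in mounts:
--             return p, mounts[p]
--     return None, None
-- ===== Notes on version B (the rewrite author's own statement) =====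
-- stated objective: faster
-- what changed: Instead of sorting all mount keys lexicographically and scanning them in reverse for one that path starts with, B walks path's own prefixes longest-first (i from min(len(path), max key length) down to 0) and probes each with a dict membership test; the matching keys are exactly the path-prefixes present in mounts, and among prefixes of one string longer means lexicographically larger, so the first hit equals A's choice.
import Mathlib
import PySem

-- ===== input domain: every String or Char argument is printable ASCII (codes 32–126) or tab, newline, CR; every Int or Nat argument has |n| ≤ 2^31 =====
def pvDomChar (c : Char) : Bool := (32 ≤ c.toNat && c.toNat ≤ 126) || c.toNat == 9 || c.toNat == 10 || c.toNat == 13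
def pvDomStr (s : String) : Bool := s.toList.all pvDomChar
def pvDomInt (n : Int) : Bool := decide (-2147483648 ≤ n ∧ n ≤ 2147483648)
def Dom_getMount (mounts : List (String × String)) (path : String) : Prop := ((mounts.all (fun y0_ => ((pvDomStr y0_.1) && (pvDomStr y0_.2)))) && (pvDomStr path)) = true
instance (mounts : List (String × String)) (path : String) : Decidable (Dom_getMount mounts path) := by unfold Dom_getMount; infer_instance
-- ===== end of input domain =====

-- B walks path's own prefixes longest-first (i from min(len(path), max key length) down to 0)
-- probing the dict, instead of A's reverse-sorted scan over the mount keys; no sort needed.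


-- ===== PORT A =====
-- the 'for d in keys: if path.startswith(d): …; break' loop (mounts[d] never raises there, d is a key)
def getMountScan (mounts : List (String × String)) (path : String) :
    List String → Option String × Option String
  | [] => (none, none)
  | d :: rest =>
    if PySem.Str.startswith path d then (some d, (PySem.Dict.mk mounts).get? d)
    else getMountScan mounts path rest

def getMount (mounts : List (String × String)) (path : String) : Option String × Option String :=
  -- keys = reversed(sorted(mounts.keys()))
  getMountScan mounts path
    ((PySem.List.sorted (PySem.Dict.keys (PySem.Dict.mk mounts)) (fun k => k)).reverse)

-- ===== PORT B =====
-- 'top = min(len(path), max(map(len, mounts), default=-1))'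
-- 'for i in range(top, -1, -1): p = path[:i]; if p in mounts: return p, mounts[p]'
def getMountAltLoop (mounts : List (String × String)) (path : String) :
    List Int → Option String × Option String
  | [] => (none, none)
  | i :: rest =>
    -- p = path[:i]
    if (PySem.Dict.mk mounts).contains (String.ofList (PySem.List.slice path.toList none (some i))) then
      (some (String.ofList (PySem.List.slice path.toList none (some i))),
       (PySem.Dict.mk mounts).get? (String.ofList (PySem.List.slice path.toList none (some i))))
    else getMountAltLoop mounts path rest

def getMount_alt (mounts : List (String × String)) (path : String) : Option String × Option String :=
  -- range(top, -1, -1) with top = min(len(path), max(map(len, mounts), default=-1))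
  getMountAltLoop mounts path
    (PySem.List.pyRange
      (min (PySem.Str.len path)
        ((PySem.List.max? (((PySem.Dict.mk mounts).keys).map (fun k => PySem.Str.len k))
            (fun x => x)).getD (-1)))
      (-1) (-1))

-- ===== PRECONDITION & SPEC =====
def Spec_getMount (mounts : List (String × String)) (path : String) (out : Option String × Option String) : Prop := out = getMount_alt mounts path
instance (mounts : List (String × String)) (path : String) (out : Option String × Option String) : Decidable (Spec_getMount mounts path out) := by unfold Spec_getMount; infer_instance

-- ===== CLAIM (what is proved, stated in full; the proofs are below) =====
def Claim_equal_getMount : Prop := ∀ (mounts : List (String × String)) (path : String), Dom_getMount mounts path → Spec_getMount mounts path (getMount mounts path)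

-- ===== LEMMAS AND PROOFS =====

-- A's loop is find? on the key list, paired with the lookup
theorem getMountScan_eq_find (mounts : List (String × String)) (path : String) (l : List String) :
    getMountScan mounts path l =
      match l.find? (fun k => PySem.Str.startswith path k) with
      | none => (none, none)
      | some m => (some m, (PySem.Dict.mk mounts).get? m) := by
  induction l with
  | nil => rfl
  | cons d rest ih =>
    by_cases h : PySem.Str.startswith path d = true
    · rw [List.find?_cons_of_pos h]
      simp only [getMountScan, h, if_true]
    · rw [List.find?_cons_of_neg h]
      simp only [getMountScan, h, Bool.false_eq_true, if_false] at *
      exact ih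

-- startswith is list prefix
theorem startswith_iff (path d : String) :
    PySem.Str.startswith path d = true ↔ d.toList <+: path.toList := by
  simp [PySem.Str.startswith, PySem.Chars.startswith, List.isPrefixOf_iff_prefix]

-- a strict prefix is lexicographically smaller
theorem lt_of_prefix_ne {s t : List Char} (h : s <+: t) (hne : s ≠ t) : s < t := by
  induction s generalizing t with
  | nil =>
    cases t with
    | nil => exact absurd rfl hne
    | cons b bs => exact List.Lex.nil
  | cons a as ih =>
    cases t with
    | nil => simp at h
    | cons b bs =>
      obtain ⟨hab, hpre⟩ := List.cons_prefix_cons.mp h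
      subst hab
      exact List.Lex.cons (ih hpre (by intro he; exact hne (by rw [he])))

-- the first hit of find? on an antitone (reverse-sorted) list is maximal among hits
theorem find?_is_max {l : List String} (hp : l.Pairwise (fun a b => b ≤ a))
    {q : String → Bool} {m : String} (h : l.find? q = some m) :
    ∀ x ∈ l, q x = true → x ≤ m := by
  induction l with
  | nil => simp at h
  | cons a t ih =>
    rw [List.pairwise_cons] at hp
    intro x hx hqx
    rw [List.mem_cons] at hx
    by_cases ha : q a = true
    · rw [List.find?_cons_of_pos ha] at h
      cases h
      rcases hx with hx | hx
      · exact le_of_eq hx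
      · exact hp.1 x hx
    · rw [List.find?_cons_of_neg ha] at h
      rcases hx with hx | hx
      · exact absurd (hx ▸ hqx) ha
      · exact ih hp.2 h x hx hqx

-- membership in A's reverse-sorted key list
theorem mem_R_iff (mounts : List (String × String)) (x : String) :
    x ∈ (PySem.List.sorted (PySem.Dict.keys (PySem.Dict.mk mounts)) (fun k => k)).reverse ↔
      x ∈ (PySem.Dict.mk mounts).keys := by
  rw [List.mem_reverse]
  exact (PySem.List.sorted_perm _ _ _).mem_iff

theorem R_pairwise (mounts : List (String × String)) :
    ((PySem.List.sorted (PySem.Dict.keys (PySem.Dict.mk mounts)) (fun k => k)).reverse).Pairwise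
      (fun a b => b ≤ a) := by
  rw [List.pairwise_reverse]
  exact PySem.List.sorted_pairwise _ _

-- the Python slice path[:i] for 0 ≤ i is take
theorem pfx_eq_take (path : String) {L : Int} (hL : 0 ≤ L) :
    String.ofList (PySem.List.slice path.toList none (some L)) =
      String.ofList (path.toList.take L.toNat) := by
  rw [PySem.List.slice_to _ hL]

-- B's countdown list n, n-1, …, 0: membership and antitonicity
theorem mem_countdown (n i : Int) :
    i ∈ PySem.List.pyRange n (-1) (-1) ↔ 0 ≤ i ∧ i ≤ n := by
  rw [PySem.List.mem_pyRange_neg_one]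
  omega

theorem countdown_pairwise (n : Int) :
    (PySem.List.pyRange n (-1) (-1)).Pairwise (fun a b => b ≤ a) := by
  rw [PySem.List.pyRange_neg_one_eq_reverse, List.pairwise_reverse]
  exact (PySem.List.pairwise_lt_pyRange_one _ _).imp (fun h => le_of_lt h)

-- B's loop returns (none, none) when no index hits a key
theorem altLoop_none (mounts : List (String × String)) (path : String) (l : List Int)
    (h : ∀ i ∈ l,
      (PySem.Dict.mk mounts).contains (String.ofList (PySem.List.slice path.toList none (some i))) = false) :
    getMountAltLoop mounts path l = (none, none) := by
  induction l with
  | nil => rfl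
  | cons i rest ih =>
    simp only [getMountAltLoop]
    rw [h i List.mem_cons_self]
    simp only [Bool.false_eq_true, if_false]
    exact ih (fun i' hi' => h i' (List.mem_cons_of_mem _ hi'))

-- B's loop returns the hit of the largest index on an antitone list
theorem altLoop_some (mounts : List (String × String)) (path : String) (l : List Int) (Lm : Int)
    (hpw : l.Pairwise (fun a b => b ≤ a)) (hmem : Lm ∈ l)
    (hhit : (PySem.Dict.mk mounts).contains (String.ofList (PySem.List.slice path.toList none (some Lm))) = true)
    (hmax : ∀ L ∈ l,
      (PySem.Dict.mk mounts).contains (String.ofList (PySem.List.slice path.toList none (some L))) = true → L ≤ Lm) :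
    getMountAltLoop mounts path l =
      (some (String.ofList (PySem.List.slice path.toList none (some Lm))),
       (PySem.Dict.mk mounts).get? (String.ofList (PySem.List.slice path.toList none (some Lm)))) := by
  induction l with
  | nil => simp at hmem
  | cons L rest ih =>
    rw [List.pairwise_cons] at hpw
    rw [List.mem_cons] at hmem
    simp only [getMountAltLoop]
    rcases hmem with hmem | hmem
    · subst hmem
      rw [hhit, if_pos rfl]
    · by_cases hc : (PySem.Dict.mk mounts).contains
          (String.ofList (PySem.List.slice path.toList none (some L))) = true
      · have hLL : L = Lm := le_antisymm (hmax L List.mem_cons_self hc) (hpw.1 Lm hmem)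
        subst hLL
        rw [hc, if_pos rfl]
      · rw [Bool.not_eq_true] at hc
        rw [hc]
        simp only [Bool.false_eq_true, if_false]
        exact ih hpw.2 hmem (fun L' hL' => hmax L' (List.mem_cons_of_mem _ hL'))

theorem getMount_eq_alt (mounts : List (String × String)) (path : String) :
    getMount mounts path = getMount_alt mounts path := by
  have hbp : ∀ j : Nat, (String.ofList (path.toList.take j)).toList <+: path.toList := by
    intro j
    rw [String.toList_ofList]
    exact List.take_prefix j path.toList
  rw [getMount, getMountScan_eq_find, getMount_alt]
  cases hf : ((PySem.List.sorted (PySem.Dict.keys (PySem.Dict.mk mounts)) (fun k => k)).reverse).find?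
      (fun k => PySem.Str.startswith path k) with
  | none =>
    rw [List.find?_eq_none] at hf
    refine (altLoop_none mounts path _ ?_).symm
    intro i hi
    have h0 : 0 ≤ i := ((mem_countdown _ i).mp hi).1
    rw [pfx_eq_take path h0]
    by_contra hc
    rw [Bool.not_eq_false, PySem.Dict.contains_iff_mem_keys] at hc
    exact hf _ ((mem_R_iff mounts _).mpr hc) ((startswith_iff _ _).mpr (hbp i.toNat))
  | some m =>
    have hpm : m.toList <+: path.toList := (startswith_iff _ _).mp (List.find?_some hf)
    have hmK : m ∈ (PySem.Dict.mk mounts).keys := (mem_R_iff mounts m).mp (List.mem_of_find?_eq_some hf)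
    have htoNat : (PySem.Str.len m).toNat = m.toList.length := by
      rw [PySem.Str.len_eq, Int.toNat_natCast]
    have htake : path.toList.take (PySem.Str.len m).toNat = m.toList := by
      rw [htoNat]
      exact (List.prefix_iff_eq_take.mp hpm).symm
    have h0m : 0 ≤ PySem.Str.len m := by rw [PySem.Str.len_eq]; exact Int.natCast_nonneg _
    have hpfxm : String.ofList (PySem.List.slice path.toList none (some (PySem.Str.len m))) = m := by
      rw [pfx_eq_take path h0m, htake, String.ofList_toList]
    have hlem : PySem.Str.len m ≤ PySem.Str.len path := by
      rw [PySem.Str.len_eq, PySem.Str.len_eq]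
      exact_mod_cast hpm.length_le
    have hlemax : PySem.Str.len m ≤
        (PySem.List.max? (((PySem.Dict.mk mounts).keys).map (fun k => PySem.Str.len k))
          (fun x => x)).getD (-1) := by
      cases hM : PySem.List.max? (((PySem.Dict.mk mounts).keys).map (fun k => PySem.Str.len k))
          (fun x => x) with
      | none =>
        rw [PySem.List.max?_eq_none_iff, List.map_eq_nil_iff] at hM
        rw [hM] at hmK
        simp at hmK
      | some M =>
        exact PySem.List.max?_isMax hM _ (List.mem_map_of_mem hmK)
    have hmem : PySem.Str.len m ∈ PySem.List.pyRange
        (min (PySem.Str.len path)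
          ((PySem.List.max? (((PySem.Dict.mk mounts).keys).map (fun k => PySem.Str.len k))
              (fun x => x)).getD (-1)))
        (-1) (-1) :=
      (mem_countdown _ _).mpr ⟨h0m, le_min hlem hlemax⟩
    have hhit : (PySem.Dict.mk mounts).contains
        (String.ofList (PySem.List.slice path.toList none (some (PySem.Str.len m)))) = true := by
      rw [hpfxm, PySem.Dict.contains_iff_mem_keys]
      exact hmK
    have hmax : ∀ L ∈ PySem.List.pyRange
        (min (PySem.Str.len path)
          ((PySem.List.max? (((PySem.Dict.mk mounts).keys).map (fun k => PySem.Str.len k))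
              (fun x => x)).getD (-1)))
        (-1) (-1),
        (PySem.Dict.mk mounts).contains (String.ofList (PySem.List.slice path.toList none (some L))) = true →
        L ≤ PySem.Str.len m := by
      intro L hL hc
      obtain ⟨h0, hLtop⟩ := (mem_countdown _ L).mp hL
      have hLn : L ≤ PySem.Str.len path := le_trans hLtop (min_le_left _ _)
      rw [pfx_eq_take path h0, PySem.Dict.contains_iff_mem_keys] at hc
      have hxle : String.ofList (path.toList.take L.toNat) ≤ m :=
        find?_is_max (R_pairwise mounts) hf _ ((mem_R_iff mounts _).mpr hc)
          ((startswith_iff _ _).mpr (hbp L.toNat))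
      by_contra hgt
      rw [not_le] at hgt
      have hLtoNat : L.toNat ≤ path.toList.length := by
        rw [PySem.Str.len_eq] at hLn
        omega
      have hlt : m < String.ofList (path.toList.take L.toNat) := by
        rw [String.lt_iff_toList_lt]
        refine lt_of_prefix_ne ?_ ?_
        · rw [String.toList_ofList, ← htake]
          refine List.take_prefix_take_left ?_
          omega
        · intro he
          have hlen : m.toList.length = L.toNat := by
            rw [he, String.toList_ofList, List.length_take, Nat.min_eq_left hLtoNat]
          rw [PySem.Str.len_eq] at hgt
          omega
      exact absurd hxle (not_le.mpr hlt)
    rw [altLoop_some mounts path _ (PySem.Str.len m) (countdown_pairwise _) hmem hhit hmax, hpfxm]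

-- ===== VERDICT =====
theorem getMount_spec : Claim_equal_getMount := by
  intro mounts path _
  unfold Spec_getMount
  exact getMount_eq_alt mounts path
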